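-- pv_equiv track=rewrite | github.com/codephage2020/odgg | backend/tests/test_eval_brief_quality.py | score_measures
-- ===== SOURCE A (Python) =====
-- VALID_AGGREGATIONS = {"SUM", "AVG", "COUNT", "MIN", "MAX", "COUNT_DISTINCT"}
--
-- def score_measures(result: dict) -> dict:
--     """Score measure suggestions against TPC-H ground truth."""
--     measures = result.get("measures", [])
--     source_cols = {(m.get("source_column") or "").lower() for m in measures}
--     scores = {
--         "has_measures": len(measures) >= 2,
--         "has_quantity": "l_quantity" in source_cols,
--         "has_extended_price": "l_extendedprice" in source_cols,
--         "has_discount": "l_discount" in source_cols,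
--         "valid_aggregations": all(
--             m.get("aggregation", "").upper() in VALID_AGGREGATIONS for m in measures
--         ),
--         "has_data_types": all(m.get("data_type") for m in measures),
--         "sources_from_lineitem": any(
--             (m.get("source_table") or "").lower() == "lineitem" for m in measures
--         ),
--     }
--     return scores
-- ===== SOURCE B (Python) =====
-- VALID_AGGREGATIONS = {"SUM", "AVG", "COUNT", "MIN", "MAX", "COUNT_DISTINCT"}
--
-- def score_measures(result: dict) -> dict:
--     """Score measure suggestions against TPC-H ground truth (single pass over measures)."""
--     measures = result.get("measures", [])
--     has_quantity = has_extended_price = has_discount = sources_from_lineitem = False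
--     valid_aggregations = has_data_types = True
--     for m in measures:
--         col = (m.get("source_column") or "").lower()
--         if col == "l_quantity":
--             has_quantity = True
--         if col == "l_extendedprice":
--             has_extended_price = True
--         if col == "l_discount":
--             has_discount = True
--         if m.get("aggregation", "").upper() not in VALID_AGGREGATIONS:
--             valid_aggregations = False
--         if not m.get("data_type"):
--             has_data_types = False
--         if (m.get("source_table") or "").lower() == "lineitem":
--             sources_from_lineitem = True
--     return {
--         "has_measures": len(measures) >= 2,
--         "has_quantity": has_quantity,
--         "has_extended_price": has_extended_price,
--         "has_discount": has_discount,
--         "valid_aggregations": valid_aggregations,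
--         "has_data_types": has_data_types,
--         "sources_from_lineitem": sources_from_lineitem,
--     }
-- ===== Notes on version B (the rewrite author's own statement) =====
-- stated objective: alternative
-- what changed: Replaced A's set comprehension plus three separate all/any comprehension passes over the measures with a single fused loop that maintains six boolean flags.
import Mathlib
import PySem

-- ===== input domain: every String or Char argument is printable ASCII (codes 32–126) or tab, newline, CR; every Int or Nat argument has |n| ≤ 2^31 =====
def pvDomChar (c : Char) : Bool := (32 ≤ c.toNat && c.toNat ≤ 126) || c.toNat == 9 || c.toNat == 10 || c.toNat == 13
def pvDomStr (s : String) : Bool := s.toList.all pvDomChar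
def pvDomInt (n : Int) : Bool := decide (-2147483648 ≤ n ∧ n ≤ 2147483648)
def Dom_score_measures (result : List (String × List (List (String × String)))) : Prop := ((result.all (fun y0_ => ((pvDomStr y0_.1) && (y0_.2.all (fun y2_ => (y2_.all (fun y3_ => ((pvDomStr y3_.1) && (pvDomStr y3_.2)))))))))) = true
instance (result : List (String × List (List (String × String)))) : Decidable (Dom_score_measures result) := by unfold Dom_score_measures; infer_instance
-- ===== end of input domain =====

-- B replaces A's set comprehension and three separate all/any passes by one fused loop over the
-- measures maintaining six boolean flags (objective: alternative single-pass decomposition).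

def VALID_AGGREGATIONS : PySem.Set String :=
  PySem.Set.ofList ["SUM", "AVG", "COUNT", "MIN", "MAX", "COUNT_DISTINCT"]

-- ===== PORT A =====
def score_measures (result : List (String × List (List (String × String)))) : List (String × Bool) :=
  let measures := (PySem.Dict.mk result).getD "measures" []
  let source_cols : PySem.Set String :=
    PySem.Set.ofList (measures.map (fun m =>
      PySem.Str.lower (((PySem.Dict.mk m).get? "source_column").getD "")))
  [("has_measures", decide (2 ≤ measures.length)),
   ("has_quantity", source_cols.contains "l_quantity"),
   ("has_extended_price", source_cols.contains "l_extendedprice"),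
   ("has_discount", source_cols.contains "l_discount"),
   ("valid_aggregations", measures.all (fun m =>
      VALID_AGGREGATIONS.contains (PySem.Str.upper ((PySem.Dict.mk m).getD "aggregation" "")))),
   ("has_data_types", measures.all (fun m =>
      !(((PySem.Dict.mk m).get? "data_type").getD "" == ""))),
   ("sources_from_lineitem", measures.any (fun m =>
      PySem.Str.lower (((PySem.Dict.mk m).get? "source_table").getD "") == "lineitem"))]

-- ===== PORT B =====
-- the body of Source B's for-loop: one measure updates the six flags (q, ep, d, va, dt, li)
def pvStep (s : Bool × Bool × Bool × Bool × Bool × Bool) (m : List (String × String)) :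
    Bool × Bool × Bool × Bool × Bool × Bool :=
  let col := PySem.Str.lower (((PySem.Dict.mk m).get? "source_column").getD "")
  let q := if col == "l_quantity" then true else s.1
  let ep := if col == "l_extendedprice" then true else s.2.1
  let d := if col == "l_discount" then true else s.2.2.1
  let va := if !(VALID_AGGREGATIONS.contains
                  (PySem.Str.upper ((PySem.Dict.mk m).getD "aggregation" "")))
            then false else s.2.2.2.1
  let dt := if ((PySem.Dict.mk m).get? "data_type").getD "" == ""
            then false else s.2.2.2.2.1
  let li := if PySem.Str.lower (((PySem.Dict.mk m).get? "source_table").getD "") == "lineitem"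
            then true else s.2.2.2.2.2
  (q, ep, d, va, dt, li)

def score_measures_alt (result : List (String × List (List (String × String)))) : List (String × Bool) :=
  let measures := (PySem.Dict.mk result).getD "measures" []
  let s := measures.foldl pvStep (false, false, false, true, true, false)
  [("has_measures", decide (2 ≤ measures.length)),
   ("has_quantity", s.1),
   ("has_extended_price", s.2.1),
   ("has_discount", s.2.2.1),
   ("valid_aggregations", s.2.2.2.1),
   ("has_data_types", s.2.2.2.2.1),
   ("sources_from_lineitem", s.2.2.2.2.2)]

-- ===== PRECONDITION & SPEC =====
def Spec_score_measures (result : List (String × List (List (String × String)))) (out : List (String × Bool)) : Prop := out = score_measures_alt result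
instance (result : List (String × List (List (String × String)))) (out : List (String × Bool)) : Decidable (Spec_score_measures result out) := by unfold Spec_score_measures; infer_instance

-- ===== CLAIM (what is proved, stated in full; the proofs are below) =====
def Claim_equal_score_measures : Prop := ∀ (result : List (String × List (List (String × String)))), Dom_score_measures result → Spec_score_measures result (score_measures result)

-- ===== LEMMAS AND PROOFS =====

-- boolean re-association of one loop step against the any/all of the rest
theorem pv_or (c q r : Bool) : ((if c then true else q) || r) = (q || (c || r)) := by
  cases c <;> cases q <;> cases r <;> simp
theorem pv_and1 (c q r : Bool) : ((if !c then false else q) && r) = (q && (c && r)) := by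
  cases c <;> cases q <;> cases r <;> simp
theorem pv_and2 (c q r : Bool) : ((if c then false else q) && r) = (q && (!c && r)) := by
  cases c <;> cases q <;> cases r <;> simp

-- B's fused loop computes, in each component, the corresponding any/all of A
theorem pv_fold (ms : List (List (String × String))) (q ep d va dt li : Bool) :
    ms.foldl pvStep (q, ep, d, va, dt, li) =
    ( q || ms.any (fun m =>
        PySem.Str.lower (((PySem.Dict.mk m).get? "source_column").getD "") == "l_quantity"),
      ep || ms.any (fun m =>
        PySem.Str.lower (((PySem.Dict.mk m).get? "source_column").getD "") == "l_extendedprice"),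
      d || ms.any (fun m =>
        PySem.Str.lower (((PySem.Dict.mk m).get? "source_column").getD "") == "l_discount"),
      va && ms.all (fun m =>
        VALID_AGGREGATIONS.contains (PySem.Str.upper ((PySem.Dict.mk m).getD "aggregation" ""))),
      dt && ms.all (fun m =>
        !(((PySem.Dict.mk m).get? "data_type").getD "" == "")),
      li || ms.any (fun m =>
        PySem.Str.lower (((PySem.Dict.mk m).get? "source_table").getD "") == "lineitem")) := by
  induction ms generalizing q ep d va dt li with
  | nil => simp
  | cons m ms ih =>
      simp only [List.foldl_cons, List.any_cons, List.all_cons, pvStep, ih, Prod.mk.injEq]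
      refine ⟨pv_or _ _ _, pv_or _ _ _, pv_or _ _ _, pv_and1 _ _ _, pv_and2 _ _ _, pv_or _ _ _⟩

theorem pv_contains_map {α : Type} (ms : List α) (f : α → String) (y : String) :
    (PySem.Set.ofList (ms.map f)).contains y = ms.any (fun m => f m == y) := by
  rw [Bool.eq_iff_iff]
  simp only [PySem.Set.contains, List.contains_iff_mem, PySem.Set.mem_ofList,
    List.mem_map, List.any_eq_true, beq_iff_eq]

-- ===== VERDICT (by name: the statement is the Claim_ definition above) =====
theorem score_measures_spec : Claim_equal_score_measures := by
  intro result _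
  show score_measures result = score_measures_alt result
  simp only [score_measures, score_measures_alt, pv_fold, pv_contains_map,
    Bool.false_or, Bool.true_and]
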